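-- pv_equiv track=rewrite | github.com/kcwww/Problem-Solving | 프로그래머스/unrated/142086. 가장 가까운 같은 글자/가장 가까운 같은 글자.py | solution
-- ===== SOURCE A (Python) =====
-- def solution(s):
--     str_len = len(s)
--     answer = []
--     for i in range(str_len):
--         result = -1
--         for j in range(i):
--             if s[i] == s[j]:
--                 result = i - j
--         answer.append(result)
--
--     return answer
-- ===== SOURCE B (Python) =====
-- def solution(s):
--     last = {}
--     answer = []
--     for i, ch in enumerate(s):
--         answer.append(i - last[ch] if ch in last else -1)
--         last[ch] = i
--     return answer
-- ===== Notes on version B (the rewrite author's own statement) =====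
-- stated objective: faster
-- what changed: Replaced the quadratic inner rescan of all earlier positions with a single pass that keeps each character's last-seen index in a dict.
import Mathlib
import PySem

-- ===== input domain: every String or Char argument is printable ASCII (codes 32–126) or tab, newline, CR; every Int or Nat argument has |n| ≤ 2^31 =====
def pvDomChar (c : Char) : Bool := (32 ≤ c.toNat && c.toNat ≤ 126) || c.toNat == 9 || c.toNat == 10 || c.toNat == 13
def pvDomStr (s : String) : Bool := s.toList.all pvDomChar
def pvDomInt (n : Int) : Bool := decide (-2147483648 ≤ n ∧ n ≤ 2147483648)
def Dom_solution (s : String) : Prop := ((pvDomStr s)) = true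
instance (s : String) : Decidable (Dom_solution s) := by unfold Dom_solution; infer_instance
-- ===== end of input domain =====

-- B replaces A's quadratic rescan of all earlier positions by a single pass with a
-- last-seen-index dict (objective: faster, asymptotic). Return values are proved equal.

-- ===== PORT A =====
-- literal transliteration of A's two nested index loops over s
def aRun (l : List Char) : List Int :=
  let strLen : Int := (l.length : Int)
  (PySem.List.pyRange 0 strLen 1).foldl
    (fun answer i =>
      answer ++ [(PySem.List.pyRange 0 i 1).foldl
        (fun result j =>
          if PySem.List.pyGet? l i = PySem.List.pyGet? l j then i - j else result)
        (-1)])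
    []

def solution (s : String) : List Int := aRun s.toList

-- ===== PORT B =====
-- one loop step of Source B: append distance computed from the old dict, then update it
def bStep (st : PySem.Dict Char Int × List Int) (q : Int × Char) :
    PySem.Dict Char Int × List Int :=
  (st.1.insert q.2 q.1,
   st.2 ++ [match st.1.get? q.2 with
            | some j => q.1 - j
            | none => -1])

def bRun (l : List Char) : List Int :=
  ((PySem.List.enumerate l 0).foldl bStep (PySem.Dict.empty, [])).2

def solution_alt (s : String) : List Int := bRun s.toList

-- ===== PRECONDITION & SPEC =====
def Spec_solution (s : String) (out : List Int) : Prop := out = solution_alt s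
instance (s : String) (out : List Int) : Decidable (Spec_solution s out) := by unfold Spec_solution; infer_instance

-- ===== CLAIM (what is proved, stated in full; the proofs are below) =====
def Claim_equal_solution : Prop := ∀ (s : String), Dom_solution s → Spec_solution s (solution s)

-- ===== LEMMAS AND PROOFS =====

-- index of the last occurrence of c in p (none if absent)
def lastIdx : List Char → Char → Option Nat
  | [], _ => none
  | x :: xs, c =>
    match lastIdx xs c with
    | some k => some (k + 1)
    | none => if c = x then some 0 else none

lemma foldE (c : Char) (n : Int) :
    ∀ (p : List Char) (s0 r0 : Int),
      (PySem.List.enumerate p s0).foldl (fun r q => if c = q.2 then n - q.1 else r) r0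
      = match lastIdx p c with
        | some k => n - (s0 + (k : Int))
        | none => r0 := by
  intro p
  induction p with
  | nil => intro s0 r0; simp [PySem.List.enumerate_nil, lastIdx]
  | cons x xs ih =>
    intro s0 r0
    rw [PySem.List.enumerate_cons]
    simp only [List.foldl_cons]
    rw [ih]
    cases h : lastIdx xs c with
    | some k =>
      simp only [lastIdx, h]
      push_cast
      ring_nf
    | none =>
      by_cases hx : c = x
      · subst hx; simp [lastIdx, h]
      · simp [lastIdx, h, hx]

lemma foldD (c : Char) :
    ∀ (p : List Char) (s0 : Int) (d : PySem.Dict Char Int),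
      ((PySem.List.enumerate p s0).foldl (fun d (q : Int × Char) => d.insert q.2 q.1) d).get? c
      = match lastIdx p c with
        | some k => some (s0 + (k : Int))
        | none => d.get? c := by
  intro p
  induction p with
  | nil => intro s0 d; simp [PySem.List.enumerate_nil, lastIdx]
  | cons x xs ih =>
    intro s0 d
    rw [PySem.List.enumerate_cons]
    simp only [List.foldl_cons]
    rw [ih]
    cases h : lastIdx xs c with
    | some k =>
      simp only [lastIdx, h]
      push_cast
      ring_nf
    | none =>
      simp only [lastIdx, h, PySem.Dict.get?_insert]
      by_cases hx : c = x <;> simp [hx]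

lemma bFst (ps : List (Int × Char)) (st : PySem.Dict Char Int × List Int) :
    (ps.foldl bStep st).1 = ps.foldl (fun d (q : Int × Char) => d.insert q.2 q.1) st.1 := by
  induction ps generalizing st with
  | nil => rfl
  | cons q qs ih => simp [List.foldl_cons, ih, bStep]

lemma pyGet_append_lt (l' : List Char) (c : Char) (j : Int)
    (h0 : 0 ≤ j) (h : j < (l'.length : Int)) :
    PySem.List.pyGet? (l' ++ [c]) j = PySem.List.pyGet? l' j := by
  rw [PySem.List.pyGet?_of_nonneg (l' ++ [c]) h0, PySem.List.pyGet?_of_nonneg l' h0,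
    List.getElem?_append_left (by omega)]

-- the inner loop of A as a function of the position i
def innerF (l : List Char) (i : Int) : Int :=
  (PySem.List.pyRange 0 i 1).foldl
    (fun result j =>
      if PySem.List.pyGet? l i = PySem.List.pyGet? l j then i - j else result)
    (-1)

lemma aRun_eq_map (l : List Char) :
    aRun l = (PySem.List.pyRange 0 (l.length : Int) 1).map (innerF l) := by
  simp only [aRun]
  rw [PySem.List.foldl_append_singleton_eq_map]
  rw [List.nil_append]
  rfl

lemma innerF_prefix (l' : List Char) (c : Char) (i : Int)
    (h0 : 0 ≤ i) (h : i < (l'.length : Int)) :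
    innerF (l' ++ [c]) i = innerF l' i := by
  unfold innerF
  rw [pyGet_append_lt l' c i h0 h]
  apply PySem.List.foldl_congr_mem
  intro r j hj
  rw [PySem.List.mem_pyRange_one] at hj
  rw [pyGet_append_lt l' c j hj.1 (by omega)]

lemma innerF_last (l' : List Char) (c : Char) :
    innerF (l' ++ [c]) (l'.length : Int)
      = match lastIdx l' c with
        | some k => (l'.length : Int) - (k : Int)
        | none => -1 := by
  unfold innerF
  rw [show (l' ++ [c] : List Char) = l' ++ c :: [] from rfl,
    PySem.List.pyGet?_append_length]
  rw [PySem.List.foldl_congr_mem _ _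
    (fun r j => if c = PySem.List.pyGetD l' j c then (l'.length : Int) - j else r) _ ?_]
  · have he := PySem.List.enumerate_eq_map_pyRange l' c
    have hlen : PySem.List.len l' = (l'.length : Int) := by simp [pysem]
    rw [hlen] at he
    have h2 : List.foldl (fun r (q : Int × Char) => if c = q.2 then (l'.length : Int) - q.1 else r)
        (-1) (PySem.List.enumerate l')
        = List.foldl (fun r j => if c = PySem.List.pyGetD l' j c then (l'.length : Int) - j else r)
          (-1) (PySem.List.pyRange 0 (l'.length : Int)) := by
      rw [he, List.foldl_map]
    rw [← h2, foldE]
    cases lastIdx l' c <;> simp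
  · intro r j hj
    rw [PySem.List.mem_pyRange_one] at hj
    rw [show (l' ++ c :: [] : List Char) = l' ++ [c] from rfl,
      pyGet_append_lt l' c j hj.1 hj.2,
      PySem.List.pyGet?_eq_some_getElem l' hj.1 hj.2]
    simp [PySem.List.pyGetD_eq_getElem l' c hj.1 hj.2]

lemma aRun_eq_bRun : ∀ (l : List Char), aRun l = bRun l := by
  intro l
  induction l using List.reverseRecOn with
  | nil => rfl
  | append_singleton l' c ih =>
    have hn : (0 : Int) ≤ (l'.length : Int) := by positivity
    rw [aRun_eq_map]
    have hlen : (((l' ++ [c]).length : Nat) : Int) = (l'.length : Int) + 1 := by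
      simp
    rw [hlen, PySem.List.pyRange_one_succ_right hn, List.map_append, List.map_singleton]
    have hpre : (PySem.List.pyRange 0 (l'.length : Int) 1).map (innerF (l' ++ [c]))
        = (PySem.List.pyRange 0 (l'.length : Int) 1).map (innerF l') := by
      apply List.map_congr_left
      intro i hi
      rw [PySem.List.mem_pyRange_one] at hi
      exact innerF_prefix l' c i hi.1 hi.2
    rw [hpre, ← aRun_eq_map, ih, innerF_last]
    conv_rhs => rw [bRun, PySem.List.enumerate_append, List.foldl_append]
    simp only [PySem.List.enumerate_cons, PySem.List.enumerate_nil,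
      List.foldl_cons, List.foldl_nil, bStep]
    have hb : ((PySem.List.enumerate l' 0).foldl bStep (PySem.Dict.empty, [])).2 = bRun l' := rfl
    rw [hb, bFst, foldD]
    cases h : lastIdx l' c with
    | some k => simp
    | none => simp [PySem.Dict.get?_empty]

-- ===== VERDICT (by name: the statement is the Claim_ definition above) =====
theorem solution_spec : Claim_equal_solution := by
  intro s _
  unfold Spec_solution solution solution_alt
  exact aRun_eq_bRun s.toList
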